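-- pv_equiv track=rewrite | github.com/Dima-Chuychenko/519-_-_-_-_- | regular_expressions/regular_expressions.py | compare_regex_end
-- ===== SOURCE A (Python) =====
-- def compare_regex_end(pattern, string):
--     if pattern == '':
--         return True
--     elif string == '':
--         return False
--
--     if pattern[-1] == '.':
--         return compare_regex_end(pattern[:-1], string[:-1])
--     elif pattern[-1] == '/':
--         return len(pattern) >= 2 and pattern[-2] == string[-1] and compare_regex_end(pattern[:-2], string[:-1])
--     elif pattern[-1] == string[-1]:
--         return compare_regex_end(pattern[:-1], string[:-1])
--     else:
--         return False
-- ===== SOURCE B (Python) =====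
-- def compare_regex_end(pattern, string):
--     # One linear pass over the reversed strings (no slicing): for each pattern
--     # char from the end, consume one string char; a '/' escape additionally
--     # consumes the next (reversed) pattern char, which must match literally.
--     it_p = iter(reversed(pattern))
--     it_s = iter(reversed(string))
--     for c in it_p:
--         d = next(it_s, None)
--         if d is None:
--             return False
--         if c == '/':
--             e = next(it_p, None)
--             if e is None or e != d:
--                 return False
--         elif c != '.' and c != d:
--             return False
--     return True
-- ===== Notes on version B (the rewrite author's own statement) =====
-- stated objective: faster
-- what changed: Replaced A's end-recursion that copies both strings with slicing at every step by a single linear pass over the two reversed strings with iterators (no slicing).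
import Mathlib
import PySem

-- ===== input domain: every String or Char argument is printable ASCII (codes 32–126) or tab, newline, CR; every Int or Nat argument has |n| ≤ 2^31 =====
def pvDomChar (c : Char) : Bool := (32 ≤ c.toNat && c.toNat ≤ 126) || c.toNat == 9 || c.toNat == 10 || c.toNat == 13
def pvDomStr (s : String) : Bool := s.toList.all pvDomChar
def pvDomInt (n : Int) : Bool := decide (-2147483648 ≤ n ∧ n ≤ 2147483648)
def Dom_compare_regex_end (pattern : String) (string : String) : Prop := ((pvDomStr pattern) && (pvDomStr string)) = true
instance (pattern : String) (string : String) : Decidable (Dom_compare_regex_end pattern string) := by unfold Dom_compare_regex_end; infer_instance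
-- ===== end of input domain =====

-- B replaces A's end-recursion with repeated O(n) string slicing by a single
-- linear pass over the reversed strings (asymptotic speed-up, O(n^2) → O(n)).

-- ===== PORT A =====
-- A's recursion, on the char lists of the strings. For a nonempty list p,
-- p[-1] is ported as p.getLast?.getD ' ' and p[:-1] as p.dropLast (exact there:
-- the default of getLastD is never used, p ≠ [] is established by the guard);
-- pattern[-2] (only read under 'len(pattern) >= 2') is p.dropLast.getLast?.getD ' '.
def aGo (p s : List Char) : Bool :=
  if _hp : p = [] then true
  else if s = [] then false
  else
    if p.getLast?.getD ' ' = '.' then aGo p.dropLast s.dropLast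
    else if p.getLast?.getD ' ' = '/' then
      decide (2 ≤ p.length) && decide (p.dropLast.getLast?.getD ' ' = s.getLast?.getD ' ')
        && aGo p.dropLast.dropLast s.dropLast
    else if p.getLast?.getD ' ' = s.getLast?.getD ' ' then aGo p.dropLast s.dropLast
    else false
termination_by p.length
decreasing_by
  · have := List.length_pos_iff.mpr _hp; simp [List.length_dropLast]; omega
  · have := List.length_pos_iff.mpr _hp; simp [List.length_dropLast]; omega
  · have := List.length_pos_iff.mpr _hp; simp [List.length_dropLast]; omega

def compare_regex_end (pattern : String) (string : String) : Bool :=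
  aGo pattern.toList string.toList

-- ===== PORT B =====
-- B's single for-loop over the two reversed iterators, as structural recursion
-- over the reversed char lists.
def bGo : List Char → List Char → Bool
  | [], _ => true
  | _ :: _, [] => false
  | c :: p, d :: s =>
    if c = '/' then
      match p with
      | [] => false
      | e :: p' => if e ≠ d then false else bGo p' s
    else if c ≠ '.' ∧ c ≠ d then false
    else bGo p s

def compare_regex_end_alt (pattern : String) (string : String) : Bool :=
  bGo pattern.toList.reverse string.toList.reverse

-- ===== PRECONDITION & SPEC =====
def Spec_compare_regex_end (pattern : String) (string : String) (out : Bool) : Prop := out = compare_regex_end_alt pattern string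
instance (pattern : String) (string : String) (out : Bool) : Decidable (Spec_compare_regex_end pattern string out) := by unfold Spec_compare_regex_end; infer_instance

-- ===== CLAIM (what is proved, stated in full; the proofs are below) =====
def Claim_equal_compare_regex_end : Prop := ∀ (pattern : String) (string : String), Dom_compare_regex_end pattern string → Spec_compare_regex_end pattern string (compare_regex_end pattern string)

-- ===== LEMMAS AND PROOFS =====

theorem rev_eq {p : List Char} (h : p ≠ []) :
    p.reverse = p.getLast?.getD ' ' :: p.dropLast.reverse := by
  rcases List.eq_nil_or_concat p with rfl | ⟨ys, y, rfl⟩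
  · exact absurd rfl h
  · simp

theorem aGo_eq_bGo (n : Nat) :
    ∀ p s : List Char, p.length ≤ n → aGo p s = bGo p.reverse s.reverse := by
  induction n with
  | zero =>
    intro p s hp
    have : p = [] := List.length_eq_zero_iff.mp (Nat.le_zero.mp hp)
    subst this; simp [aGo, bGo]
  | succ n ih =>
    intro p s hp
    by_cases hpe : p = []
    · subst hpe; simp [aGo, bGo]
    · by_cases hse : s = []
      · subst hse
        rw [rev_eq hpe]; rw [aGo]; simp [hpe, bGo]
      · rw [rev_eq hpe, rev_eq hse]
        have hpl : p.dropLast.length ≤ n := by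
          have := List.length_pos_iff.mpr hpe
          simp [List.length_dropLast]; omega
        rw [aGo]; simp only [hpe, hse, dif_neg, if_neg, not_false_iff]
        by_cases hdot : p.getLast?.getD ' ' = '.'
        · have hne : p.getLast?.getD ' ' ≠ '/' := by rw [hdot]; decide
          conv_rhs => rw [bGo.eq_def]
          simp [hdot, ih p.dropLast s.dropLast hpl]
        · by_cases hsl : p.getLast?.getD ' ' = '/'
          · simp only [hsl, if_true]
            by_cases h2 : 2 ≤ p.length
            · have hdne : p.dropLast ≠ [] := by
                intro hh
                have h1 : p.dropLast.length = 0 := by rw [hh]; rfl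
                simp [List.length_dropLast] at h1; omega
              rw [rev_eq hdne]
              have hpl2 : p.dropLast.dropLast.length ≤ n := by
                have := List.length_pos_iff.mpr hpe
                simp [List.length_dropLast]; omega
              by_cases he : p.dropLast.getLast?.getD ' ' = s.getLast?.getD ' '
              · simp [bGo, h2, he, ih p.dropLast.dropLast s.dropLast hpl2]
              · simp [bGo, h2, he]
            · have hd1 : p.dropLast = [] := by
                have hl := List.length_pos_iff.mpr hpe
                have : p.length = 1 := by omega
                exact List.length_eq_zero_iff.mp (by simp [List.length_dropLast, this])
              rw [hd1]
              simp [bGo, h2]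
          · simp only [hdot, if_false, hsl, if_false]
            by_cases heq : p.getLast?.getD ' ' = s.getLast?.getD ' '
            · rw [if_pos heq, ← heq]
              conv_rhs => rw [bGo.eq_def]
              simp [hsl, ih p.dropLast s.dropLast hpl]
            · rw [if_neg heq, bGo.eq_def]
              simp [hsl, hdot, heq]

-- ===== VERDICT (by name: the statement is the Claim_ definition above) =====
theorem compare_regex_end_spec : Claim_equal_compare_regex_end := by
  intro pattern string _
  unfold Spec_compare_regex_end compare_regex_end compare_regex_end_alt
  exact aGo_eq_bGo pattern.toList.length _ _ le_rfl
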